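-- pv_equiv track=rewrite | github.com/pypi-data/pypi-mirror-221 | packages/EfficientSceneDetector/efficientscenedetector-0.0.12.tar.gz/efficientscenedetector-0.0.12/EfficientSceneDetector/helperFiles/utils.py | process_list_with_window_size
-- ===== SOURCE A (Python) =====
-- from itertools import groupby
--
-- def process_list_with_window_size(lst, window_size):
--     res = []
--     grouped_list = [list(group) for key, group in groupby(lst)]
--     for ss, i in enumerate(grouped_list):
--         if ss == 0:
--             for a in i:
--                 res.append(a)
--         else:
--             if len(i) <= window_size:
--                 for a in range(len(i)):
--                     res.append(res[len(res) - 1])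
--             elif len(i) > window_size and res[len(res) - 1] != i[0]:
--                 for a in i:
--                     res.append(a)
--             else:
--                 for a in range(len(i)):
--                     res.append(res[len(res) - 1])
--     return res
-- ===== SOURCE B (Python) =====
-- def process_list_with_window_size(lst, window_size):
--     # Element-wise forward pass: out[i] is the value at the most recent position
--     # that started the list or started a run longer than window_size; no runs are
--     # materialized and the previously emitted value is never consulted (re-adopting
--     # an equal value changes nothing, so that test is redundant).
--     out = []
--     cur = None
--     for i, x in enumerate(lst):
--         if i == 0 or (x != lst[i - 1] and _run_length_at(lst, i) > window_size):
--             cur = x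
--         out.append(cur)
--     return out
--
-- def _run_length_at(lst, i):
--     # length of the maximal run of equal values starting at position i
--     j = i + 1
--     while j < len(lst) and lst[j] == lst[i]:
--         j += 1
--     return j - i
-- ===== Notes on version B (the rewrite author's own statement) =====
-- stated objective: alternative
-- what changed: Replaces groupby-materialised run lists and the comparison with the last emitted value (res[-1]) by an element-wise forward pass that re-reads lst[i-1] and a look-ahead run-length helper, exploiting that the 'differs from last emitted' test is redundant.
import Mathlib
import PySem

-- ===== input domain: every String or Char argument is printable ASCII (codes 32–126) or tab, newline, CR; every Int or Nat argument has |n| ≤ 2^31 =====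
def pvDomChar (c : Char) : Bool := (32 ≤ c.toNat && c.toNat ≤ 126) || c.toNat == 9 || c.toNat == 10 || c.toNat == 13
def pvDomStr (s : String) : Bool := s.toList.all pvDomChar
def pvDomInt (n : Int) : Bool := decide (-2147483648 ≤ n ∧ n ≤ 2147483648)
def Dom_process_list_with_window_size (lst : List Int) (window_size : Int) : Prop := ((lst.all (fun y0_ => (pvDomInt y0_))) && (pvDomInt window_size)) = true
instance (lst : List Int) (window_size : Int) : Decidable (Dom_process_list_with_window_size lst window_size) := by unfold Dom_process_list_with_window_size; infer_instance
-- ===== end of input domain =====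

-- B replaces A's groupby-materialised runs and its comparison with the last emitted value by an
-- element-wise forward pass with a look-ahead run-length helper (objective: alternative, same cost).

-- ===== PORT A =====
-- itertools.groupby on equality: list of maximal runs of equal consecutive values
def groupRuns : List Int → List (List Int)
  | [] => []
  | x :: xs =>
    match groupRuns xs with
    | [] => [[x]]
    | g :: gs => if g.head? = some x then (x :: g) :: gs else [x] :: g :: gs

def process_list_with_window_size (lst : List Int) (window_size : Int) : List Int :=
  let grouped := groupRuns lst
  (PySem.List.enumerate grouped 0).foldl
    (fun res ssi =>
      let ss := ssi.1
      let i := ssi.2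
      if ss = 0 then
        res ++ i
      else if (i.length : Int) ≤ window_size then
        -- res[len(res)-1]: res is nonempty here in Python (first group already emitted),
        -- so the .getD 0 default is unreachable
        res ++ List.replicate i.length ((PySem.List.pyGet? res ((res.length : Int) - 1)).getD 0)
      else if (i.length : Int) > window_size ∧
              (PySem.List.pyGet? res ((res.length : Int) - 1)).getD 0 ≠ (PySem.List.pyGet? i 0).getD 0 then
        res ++ i
      else
        res ++ List.replicate i.length ((PySem.List.pyGet? res ((res.length : Int) - 1)).getD 0))
    []

-- ===== PORT B =====
-- the while loop of _run_length_at: number of leading elements of the list equal to v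
def countLead (v : Int) : List Int → Nat
  | [] => 0
  | x :: xs => if x = v then countLead v xs + 1 else 0

-- _run_length_at(lst, i): j scans forward from i+1 while equal to lst[i]; returns j - i.
-- (called only with 0 ≤ i < len(lst), where the .getD 0 and .toNat are exact)
def runLenAt (lst : List Int) (i : Int) : Int :=
  ((1 + countLead ((PySem.List.pyGet? lst i).getD 0) (lst.drop (i + 1).toNat) : Nat) : Int)

-- loop body: cur is re-assigned at position 0 and at long-run starts, then appended
def pvStep (lst : List Int) (w : Int) (st : Option Int × List Int) (ix : Int × Int) :
    Option Int × List Int :=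
  let cur := if ix.1 = 0 ∨ (ix.2 ≠ (PySem.List.pyGet? lst (ix.1 - 1)).getD 0 ∧ runLenAt lst ix.1 > w)
             then some ix.2 else st.1
  -- cur is never none when appended: position 0 sets it
  (cur, st.2 ++ [cur.getD 0])

def process_list_with_window_size_alt (lst : List Int) (window_size : Int) : List Int :=
  ((PySem.List.enumerate lst 0).foldl (pvStep lst window_size) (none, [])).2

-- ===== PRECONDITION & SPEC =====
def Spec_process_list_with_window_size (lst : List Int) (window_size : Int) (out : List Int) : Prop := out = process_list_with_window_size_alt lst window_size
instance (lst : List Int) (window_size : Int) (out : List Int) : Decidable (Spec_process_list_with_window_size lst window_size out) := by unfold Spec_process_list_with_window_size; infer_instance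

-- ===== CLAIM (what is proved, stated in full; the proofs are below) =====
def Claim_equal_process_list_with_window_size : Prop := ∀ (lst : List Int) (window_size : Int), Dom_process_list_with_window_size lst window_size → Spec_process_list_with_window_size lst window_size (process_list_with_window_size lst window_size)

-- ===== LEMMAS AND PROOFS =====

-- runs as (value, length) pairs, the common reference of both proofs
def pvRuns : List Int → List (Int × Nat)
  | [] => []
  | x :: xs =>
    match pvRuns xs with
    | [] => [(x, 1)]
    | (v, n) :: rest => if v = x then (x, n + 1) :: rest else (x, 1) :: (v, n) :: rest

-- A's per-run emitted value (groupby semantics: compares with the last emitted value)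
def pvFlush (window_size : Int) (current : Option Int) (run_val : Int) (run_len : Nat) : Int :=
  match current with
  | none => run_val
  | some c => if (run_len : Int) > window_size ∧ run_val ≠ c then run_val else c

-- reference emitter over runs, A's rule
def pvEmit (window_size : Int) : Option Int → List (Int × Nat) → List Int
  | _, [] => []
  | cur, (v, n) :: rest =>
    let c := pvFlush window_size cur v n
    List.replicate n c ++ pvEmit window_size (some c) rest

-- reference emitter over runs, B's rule (no comparison with the emitted value)
def pvEmit2 (window_size : Int) : Option Int → List (Int × Nat) → List Int
  | _, [] => []
  | cur, (v, n) :: rest =>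
    let c := match cur with | none => v | some c0 => if (n : Int) > window_size then v else c0
    List.replicate n c ++ pvEmit2 window_size (some c) rest

-- B's emitter resumed mid-run: a first run equal to the previous value p continues cur
def pvEmitCont (window_size : Int) (cur p : Int) : List (Int × Nat) → List Int
  | [] => []
  | (v, n) :: rest =>
    if v = p then List.replicate n cur ++ pvEmit2 window_size (some cur) rest
    else pvEmit2 window_size (some cur) ((v, n) :: rest)

-- the two rules agree: re-adopting an equal value changes nothing
theorem emit_eq_emit2 (w : Int) (rs : List (Int × Nat)) :
    ∀ cur, pvEmit w cur rs = pvEmit2 w cur rs := by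
  induction rs with
  | nil => intro cur; cases cur <;> rfl
  | cons p rest ih =>
    intro cur
    cases p with
    | mk v n =>
      have hc : pvFlush w cur v n
          = (match cur with | none => v | some c0 => if (n : Int) > w then v else c0) := by
        cases cur with
        | none => rfl
        | some c0 =>
          simp only [pvFlush]
          by_cases hv : v = c0
          · subst hv; simp
          · simp [hv]
      simp only [pvEmit, pvEmit2, hc, ih]

theorem pvRuns_nil_iff (xs : List Int) : pvRuns xs = [] ↔ xs = [] := by
  cases xs with
  | nil => simp [pvRuns]
  | cons x xs =>
    simp only [pvRuns]
    cases h : pvRuns xs with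
    | nil => simp
    | cons q rest =>
      obtain ⟨v, n⟩ := q
      by_cases hv : v = x <;> simp [hv]

theorem pvRuns_head_cl (xs : List Int) :
    ∀ v n rest, pvRuns xs = (v, n) :: rest → xs.head? = some v ∧ countLead v xs = n := by
  induction xs with
  | nil => intro v n rest h; simp [pvRuns] at h
  | cons x xs ih =>
    intro v n rest h
    simp only [pvRuns] at h
    cases h' : pvRuns xs with
    | nil =>
      rw [h'] at h
      dsimp only at h
      have hxs : xs = [] := (pvRuns_nil_iff xs).mp h'
      subst hxs
      injection h with h1 h2
      injection h1 with hv hn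
      subst hv; subst hn
      exact ⟨rfl, by simp [countLead]⟩
    | cons q rest' =>
      rw [h'] at h
      dsimp only at h
      obtain ⟨w', m⟩ := q
      dsimp only at h
      by_cases hw : w' = x
      · subst hw
        rw [if_pos rfl] at h
        injection h with h1 h2
        injection h1 with hv hn
        subst hv
        refine ⟨rfl, ?_⟩
        have hcl := (ih _ _ _ h').2
        simp [countLead, hcl, hn]
      · rw [if_neg hw] at h
        injection h with h1 h2
        injection h1 with hv hn
        subst hv
        refine ⟨rfl, ?_⟩
        have hhead := (ih _ _ _ h').1
        cases xs with
        | nil => simp at hhead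
        | cons y ys =>
          have hy : y = w' := by simpa using hhead
          subst hy
          simp [countLead, hw, ← hn]

-- one element consumed: the continuation emitter steps by the value c B assigns at that element
theorem contStep (w : Int) (p cur x : Int) (xs : List Int) :
    pvEmitCont w cur p (pvRuns (x :: xs)) =
      (if x = p then cur else if w < 1 + (countLead x xs : Int) then x else cur)
        :: pvEmitCont w
            (if x = p then cur else if w < 1 + (countLead x xs : Int) then x else cur)
            x (pvRuns xs) := by
  simp only [pvRuns]
  cases h : pvRuns xs with
  | nil =>
    have hxs : xs = [] := (pvRuns_nil_iff xs).mp h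
    subst hxs
    by_cases hp : x = p
    · subst hp
      simp [pvEmitCont, pvEmit2]
    · simp [pvEmitCont, pvEmit2, countLead, hp]
  | cons q rest =>
    obtain ⟨v, n⟩ := q
    dsimp only
    by_cases hv : v = x
    · subst hv
      have hcl : countLead v xs = n := (pvRuns_head_cl xs v n rest h).2
      rw [if_pos rfl, hcl]
      by_cases hp : v = p
      · subst hp
        simp [pvEmitCont, List.replicate_succ]
      · rw [if_neg hp]
        by_cases hw : w < 1 + (n : Int)
        · have hw' : w ≤ (n : Int) := by omega
          simp [pvEmitCont, pvEmit2, hp, hw, hw', List.replicate_succ]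
        · have hw' : ¬ w ≤ (n : Int) := by omega
          simp [pvEmitCont, pvEmit2, hp, hw, hw', List.replicate_succ]
    · have hhead := (pvRuns_head_cl xs v n rest h).1
      have hcl : countLead x xs = 0 := by
        cases xs with
        | nil => rfl
        | cons y ys =>
          have hy : y = v := by simpa using hhead
          subst hy
          simp [countLead, hv]
      rw [if_neg hv, hcl]
      by_cases hp : x = p
      · subst hp
        simp [pvEmitCont, pvEmit2, hv, List.replicate_succ]
      · rw [if_neg hp]
        by_cases hw : w < 1 + ((0 : Nat) : Int)
        · simp [pvEmitCont, pvEmit2, hp, hv]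
        · simp [pvEmitCont, pvEmit2, hp, hv]

-- the first element: cur becomes x unconditionally
theorem emit2_first (w : Int) (x : Int) (xs : List Int) :
    pvEmit2 w none (pvRuns (x :: xs)) = x :: pvEmitCont w x x (pvRuns xs) := by
  simp only [pvRuns]
  cases h : pvRuns xs with
  | nil => simp [pvEmit2, pvEmitCont]
  | cons q rest =>
    cases q with
    | mk v n =>
      by_cases hv : v = x
      · subst hv
        simp [pvEmit2, pvEmitCont, List.replicate_succ]
      · simp [hv, pvEmit2, pvEmitCont, List.replicate_succ]

-- B's fold over a suffix, with the previous element's value known, is the continuation emitter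
theorem go_emit (L : List Int) (w : Int) (s : List Int) :
    ∀ (i : Nat) (p cur : Int) (acc : List Int),
    L.drop i = s → 0 < i → PySem.List.pyGet? L ((i : Int) - 1) = some p →
    ((PySem.List.enumerate s (i : Int)).foldl (pvStep L w) (some cur, acc)).2
      = acc ++ pvEmitCont w cur p (pvRuns s) := by
  induction s with
  | nil => intro i p cur acc _ _ _; simp [PySem.List.enumerate, pvRuns, pvEmitCont]
  | cons x xs ih =>
    intro i p cur acc hdrop hi hp
    have hgi : PySem.List.pyGet? L (i : Int) = some x := by
      rw [PySem.List.pyGet?_natCast]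
      have h0 : (L.drop i)[0]? = some x := by rw [hdrop]; rfl
      rw [List.getElem?_drop] at h0
      simpa using h0
    have hdrop1 : L.drop (i + 1) = xs := by
      have h1 : L.drop (i + 1) = (L.drop i).drop 1 := by
        rw [List.drop_drop, Nat.add_comm]
      rw [h1, hdrop]; rfl
    have hrun : runLenAt L (i : Int) = 1 + (countLead x xs : Int) := by
      unfold runLenAt
      have ht : ((i : Int) + 1).toNat = i + 1 := by omega
      rw [hgi, ht, hdrop1]
      simp
    have hi0 : ¬ ((i : Int) = 0) := by
      intro h; omega
    rw [PySem.List.enumerate_cons, List.foldl_cons]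
    have hstep : pvStep L w (some cur, acc) ((i : Int), x)
        = (some (if x = p then cur else if w < 1 + (countLead x xs : Int) then x else cur),
           acc ++ [if x = p then cur else if w < 1 + (countLead x xs : Int) then x else cur]) := by
      unfold pvStep
      simp only [hp, hrun, hi0, false_or, Option.getD_some]
      by_cases hxp : x = p
      · simp [hxp]
      · by_cases hw : w < 1 + (countLead x xs : Int)
        · simp [hxp, hw]
        · simp [hxp, hw]
    rw [hstep]
    set c := if x = p then cur else if w < 1 + (countLead x xs : Int) then x else cur with hc
    have hnext := ih (i + 1) x c (acc ++ [c]) (by rw [← hdrop1]) (by omega)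
      (by push_cast; simpa using hgi)
    have hcast : ((i : Int) + 1) = (((i + 1 : Nat)) : Int) := by push_cast; ring
    rw [hcast, hnext, contStep, ← hc]
    simp

-- B equals the reference emitter with B's rule
theorem alt_eq_emit2 (lst : List Int) (window_size : Int) :
    process_list_with_window_size_alt lst window_size
      = pvEmit2 window_size none (pvRuns lst) := by
  cases lst with
  | nil => rfl
  | cons x xs =>
    unfold process_list_with_window_size_alt
    rw [PySem.List.enumerate_cons, List.foldl_cons]
    have hstep : pvStep (x :: xs) window_size (none, []) ((0 : Int), x) = (some x, [x]) := by
      unfold pvStep; simp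
    rw [hstep]
    have hgo := go_emit (x :: xs) window_size xs 1 x x [x] (by rfl) (by omega)
      (by simp)
    simp only [Nat.cast_one] at hgo
    simp only [zero_add]
    rw [hgo, emit2_first]
    rfl

-- every run in pvRuns is nonempty
theorem pvRuns_pos (xs : List Int) : ∀ p ∈ pvRuns xs, 1 ≤ p.2 := by
  induction xs with
  | nil => intro p hp; simp [pvRuns] at hp
  | cons x xs ih =>
    intro p hp
    simp only [pvRuns] at hp
    cases h : pvRuns xs with
    | nil => rw [h] at hp; simp at hp; simp [hp]
    | cons q rest =>
      rw [h] at hp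
      cases q with
      | mk v n =>
        by_cases hv : v = x
        · simp [hv] at hp
          rcases hp with hp | hp
          · simp [hp]
          · exact ih p (by simp [h, hp])
        · simp [hv] at hp
          rcases hp with hp | hp | hp
          · simp [hp]
          · have := ih (v, n) (by simp [h]); simpa [hp] using this
          · exact ih p (by simp [h, hp])

-- the groups A builds are the replicated runs
theorem groupRuns_eq (xs : List Int) :
    groupRuns xs = (pvRuns xs).map (fun p => List.replicate p.2 p.1) := by
  induction xs with
  | nil => rfl
  | cons x xs ih =>
    simp only [groupRuns, pvRuns, ih]
    cases h : pvRuns xs with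
    | nil => rfl
    | cons q rest =>
      cases q with
      | mk v n =>
        have hn : 1 ≤ n := pvRuns_pos xs (v, n) (by simp [h])
        have hhead : (List.replicate n v).head? = some v := by
          cases n with
          | zero => omega
          | succ m => simp [List.replicate]
        by_cases hv : v = x
        · subst hv
          simp [hhead, List.replicate_succ]
        · have : (List.replicate n v).head? ≠ some x := by simp [hhead, hv]
          simp [List.map, hhead, hv, List.replicate]

-- last element of res after appending a nonempty replicate
theorem last_append_replicate (res : List Int) (n : Nat) (c : Int) (hn : 1 ≤ n) :
    (res ++ List.replicate n c).getLast? = some c := by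
  cases n with
  | zero => omega
  | succ m =>
    rw [List.getLast?_append]
    simp [List.getLast?_replicate]

theorem pyGet_last (res : List Int) (h : res ≠ []) :
    (PySem.List.pyGet? res ((res.length : Int) - 1)).getD 0 = (res.getLast?).getD 0 := by
  have hlen : 1 ≤ res.length := by
    cases res with
    | nil => simp at h
    | cons a l => simp
  have h0 : (0 : Int) ≤ (res.length : Int) - 1 := by
    omega
  rw [PySem.List.pyGet?_of_nonneg res h0]
  have ht : ((res.length : Int) - 1).toNat = res.length - 1 := by omega
  rw [ht, List.getLast?_eq_getElem?]

-- A's fold over the non-first groups equals the reference emitter with A's rule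
theorem foldA_emit (window_size : Int) (rp : List (Int × Nat)) :
    ∀ (s : Int) (res : List Int) (cur : Int),
    (∀ p ∈ rp, 1 ≤ p.2) → 1 ≤ s → res.getLast? = some cur →
    (PySem.List.enumerate (rp.map (fun p => List.replicate p.2 p.1)) s).foldl
      (fun res ssi =>
        let ss := ssi.1
        let i := ssi.2
        if ss = 0 then res ++ i
        else if (i.length : Int) ≤ window_size then
          res ++ List.replicate i.length ((PySem.List.pyGet? res ((res.length : Int) - 1)).getD 0)
        else if (i.length : Int) > window_size ∧
                (PySem.List.pyGet? res ((res.length : Int) - 1)).getD 0 ≠ (PySem.List.pyGet? i 0).getD 0 then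
          res ++ i
        else
          res ++ List.replicate i.length ((PySem.List.pyGet? res ((res.length : Int) - 1)).getD 0))
      res
    = res ++ pvEmit window_size (some cur) rp := by
  induction rp with
  | nil => intro s res cur _ _ _; simp [pvEmit]
  | cons p rest ih =>
    intro s res cur hpos hs hlast
    cases p with
    | mk v n =>
      have hn : 1 ≤ n := hpos (v, n) (by simp)
      have hne : res ≠ [] := by
        intro h; rw [h] at hlast; simp at hlast
      have hget : (PySem.List.pyGet? res ((res.length : Int) - 1)).getD 0 = cur := by
        rw [pyGet_last res hne, hlast]; rfl
      have hhead : (PySem.List.pyGet? (List.replicate n v) 0).getD 0 = v := by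
        cases n with
        | zero => omega
        | succ m => simp [List.replicate_succ]
      simp only [List.map, PySem.List.enumerate_cons, List.foldl_cons]
      rw [if_neg (by omega : ¬ s = 0)]
      set c := pvFlush window_size (some cur) v n with hc
      have hstep :
          (if (( (List.replicate n v).length : Int) ≤ window_size) then
            res ++ List.replicate (List.replicate n v).length ((PySem.List.pyGet? res ((res.length : Int) - 1)).getD 0)
          else if (((List.replicate n v).length : Int) > window_size ∧
                  (PySem.List.pyGet? res ((res.length : Int) - 1)).getD 0 ≠ (PySem.List.pyGet? (List.replicate n v) 0).getD 0) then
            res ++ List.replicate n v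
          else
            res ++ List.replicate (List.replicate n v).length ((PySem.List.pyGet? res ((res.length : Int) - 1)).getD 0))
          = res ++ List.replicate n c := by
        simp only [List.length_replicate, hget, hhead]
        by_cases hle : (n : Int) ≤ window_size
        · rw [if_pos hle]
          have : c = cur := by
            rw [hc]; simp only [pvFlush]
            rw [if_neg]; rintro ⟨h1, -⟩; omega
          rw [this]
        · rw [if_neg hle]
          by_cases hdv : cur = v
          · have hcond : ¬ ((n : Int) > window_size ∧ cur ≠ v) := by simp [hdv]
            rw [if_neg hcond]
            have : c = cur := by
              rw [hc]; simp only [pvFlush]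
              rw [if_neg]; rintro ⟨-, h2⟩; exact h2 hdv.symm
            rw [this, hdv]
          · have hcond : ((n : Int) > window_size ∧ cur ≠ v) := ⟨by omega, hdv⟩
            rw [if_pos hcond]
            have : c = v := by
              rw [hc]; simp only [pvFlush]
              rw [if_pos ⟨by omega, fun h => hdv h.symm⟩]
            rw [this]
      rw [hstep]
      have hlast' : (res ++ List.replicate n c).getLast? = some c :=
        last_append_replicate res n c hn
      have hrec := ih (s + 1) (res ++ List.replicate n c) c
        (fun q hq => hpos q (by simp [hq])) (by omega) hlast'
      rw [hrec]
      simp [pvEmit, hc]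

-- A equals the reference emitter with A's rule
theorem a_eq_emit (lst : List Int) (window_size : Int) :
    process_list_with_window_size lst window_size = pvEmit window_size none (pvRuns lst) := by
  unfold process_list_with_window_size
  rw [groupRuns_eq]
  cases h : pvRuns lst with
  | nil => simp [pvEmit]
  | cons p rest =>
    cases p with
    | mk v n =>
      have hn : 1 ≤ n := pvRuns_pos lst (v, n) (by simp [h])
      have hlast : (List.replicate n v).getLast? = some v := by
        rw [List.getLast?_replicate]; simp; omega
      have hfold := foldA_emit window_size rest 1 (List.replicate n v) v
        (fun q hq => pvRuns_pos lst q (by simp [h, hq])) (by omega) hlast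
      simp only [List.map, PySem.List.enumerate_cons, List.foldl_cons, reduceIte,
        List.nil_append, zero_add]
      rw [hfold]
      simp [pvEmit, pvFlush]

-- ===== VERDICT (by name: the statement is the Claim_ definition above) =====
theorem process_list_with_window_size_spec : Claim_equal_process_list_with_window_size := by
  intro lst window_size _
  unfold Spec_process_list_with_window_size
  rw [a_eq_emit, alt_eq_emit2, emit_eq_emit2]
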